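-- pv_equiv track=rewrite | github.com/kovidd/Computer-Vision | Project/Fluo_centroid_testing_mitosis_kovid.py | formatting_bbox
-- ===== SOURCE A (Python) =====
-- def formatting_bbox(all_bbox):
--     out_rects = []
--     for bbox in all_bbox:
--         start_x = min(i[0] for i in bbox)
--         end_x = max(i[0] for i in bbox)
--         start_y = min(i[1] for i in bbox)
--         end_y = max(i[1] for i in bbox)
--         bbox_tuple = (start_x, start_y, end_x, end_y)
--         out_rects.append(bbox_tuple)
--     return out_rects
-- ===== SOURCE B (Python) =====
-- def formatting_bbox(all_bbox):
--     out_rects = []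
--     for bbox in all_bbox:
--         (sx, sy) = bbox[0]
--         ex, ey = sx, sy
--         for (x, y) in bbox[1:]:
--             if x < sx:
--                 sx = x
--             if x > ex:
--                 ex = x
--             if y < sy:
--                 sy = y
--             if y > ey:
--                 ey = y
--         out_rects.append((sx, sy, ex, ey))
--     return out_rects
-- ===== Notes on version B (the rewrite author's own statement) =====
-- stated objective: simpler
-- what changed: Each bbox is scanned once with four running min/max accumulators seeded from its first point, instead of four separate min()/max() generator passes.
import Mathlib
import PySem

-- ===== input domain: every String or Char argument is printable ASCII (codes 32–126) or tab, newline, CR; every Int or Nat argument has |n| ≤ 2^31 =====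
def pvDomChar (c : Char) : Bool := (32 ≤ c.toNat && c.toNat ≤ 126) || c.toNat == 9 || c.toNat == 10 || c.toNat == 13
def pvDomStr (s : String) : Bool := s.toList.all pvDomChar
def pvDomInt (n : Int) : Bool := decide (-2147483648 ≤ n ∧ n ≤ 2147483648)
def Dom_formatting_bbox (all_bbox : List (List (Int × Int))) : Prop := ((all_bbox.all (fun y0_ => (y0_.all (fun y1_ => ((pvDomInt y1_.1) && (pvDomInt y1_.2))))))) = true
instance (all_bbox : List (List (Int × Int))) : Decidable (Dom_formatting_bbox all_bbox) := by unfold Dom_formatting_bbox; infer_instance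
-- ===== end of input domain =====

-- B scans each bbox once with four running min/max accumulators instead of A's four generator passes; return values agree on inputs whose bboxes are all nonempty.


-- ===== PORT A =====
-- loop over all_bbox appending (min fst, min snd, max fst, max snd); min()/max() of a
-- generator ported via PySem.List.min?/max? (none = ValueError on empty, excluded by Pre_)
def formatting_bbox (all_bbox : List (List (Int × Int))) : List (Int × Int × Int × Int) :=
  all_bbox.foldl
    (fun out_rects bbox =>
      let start_x := (PySem.List.min? (bbox.map Prod.fst) (fun x => x)).getD 0
      let end_x   := (PySem.List.max? (bbox.map Prod.fst) (fun x => x)).getD 0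
      let start_y := (PySem.List.min? (bbox.map Prod.snd) (fun x => x)).getD 0
      let end_y   := (PySem.List.max? (bbox.map Prod.snd) (fun x => x)).getD 0
      out_rects ++ [(start_x, start_y, end_x, end_y)])
    []

-- ===== PORT B =====
-- single pass over bbox[1:] updating four accumulators seeded from bbox[0]
def pvScanB (rest : List (Int × Int)) (s : Int × Int × Int × Int) : Int × Int × Int × Int :=
  rest.foldl
    (fun s q =>
      let sx := if q.1 < s.1 then q.1 else s.1
      let ex := if q.1 > s.2.2.1 then q.1 else s.2.2.1
      let sy := if q.2 < s.2.1 then q.2 else s.2.1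
      let ey := if q.2 > s.2.2.2 then q.2 else s.2.2.2
      (sx, sy, ex, ey)) s

def formatting_bbox_alt (all_bbox : List (List (Int × Int))) : List (Int × Int × Int × Int) :=
  all_bbox.foldl
    (fun out_rects bbox =>
      match bbox with
      | [] => out_rects  -- B raises IndexError here (bbox[0]); outside Pre_
      | p :: rest => out_rects ++ [pvScanB rest (p.1, p.2, p.1, p.2)])
    []

-- ===== PRECONDITION & SPEC =====
-- Pre_ excludes inputs containing an empty bbox, on which A raises ValueError (min of empty sequence).
def Pre_formatting_bbox (all_bbox : List (List (Int × Int))) : Prop :=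
  (all_bbox.all (fun b => !b.isEmpty)) = true
instance (all_bbox : List (List (Int × Int))) : Decidable (Pre_formatting_bbox all_bbox) := by
  unfold Pre_formatting_bbox; infer_instance
def pvWitness_formatting_bbox : (List (List (Int × Int))) := [[(0, 0), (3, 1)], [(2, 2)]]

def Spec_formatting_bbox (all_bbox : List (List (Int × Int))) (out : List (Int × Int × Int × Int)) : Prop := out = formatting_bbox_alt all_bbox
instance (all_bbox : List (List (Int × Int))) (out : List (Int × Int × Int × Int)) : Decidable (Spec_formatting_bbox all_bbox out) := by unfold Spec_formatting_bbox; infer_instance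

-- ===== CLAIM (what is proved, stated in full; the proofs are below) =====
def Claim_equal_formatting_bbox : Prop := ∀ (all_bbox : List (List (Int × Int))), Dom_formatting_bbox all_bbox → Pre_formatting_bbox all_bbox → Spec_formatting_bbox all_bbox (formatting_bbox all_bbox)

-- ===== LEMMAS AND PROOFS =====

theorem pvScanB_eq (rest : List (Int × Int)) (a b c d : Int) :
    pvScanB rest (a, b, c, d) =
      ((rest.map Prod.fst).foldl min a,
       (rest.map Prod.snd).foldl min b,
       (rest.map Prod.fst).foldl max c,
       (rest.map Prod.snd).foldl max d) := by
  induction rest generalizing a b c d with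
  | nil => rfl
  | cons q t ih =>
      simp only [pvScanB, List.foldl_cons, List.map_cons] at *
      rw [ih]
      have h1 : (if q.1 < a then q.1 else a) = min a q.1 := by rw [min_def]; split_ifs <;> omega
      have h2 : (if q.2 < b then q.2 else b) = min b q.2 := by rw [min_def]; split_ifs <;> omega
      have h3 : (if q.1 > c then q.1 else c) = max c q.1 := by rw [max_def]; split_ifs <;> omega
      have h4 : (if q.2 > d then q.2 else d) = max d q.2 := by rw [max_def]; split_ifs <;> omega
      rw [h1, h2, h3, h4]

theorem pv_per_bbox (p : Int × Int) (rest : List (Int × Int)) :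
    ((PySem.List.min? ((p :: rest).map Prod.fst) (fun x => x)).getD 0,
     (PySem.List.min? ((p :: rest).map Prod.snd) (fun x => x)).getD 0,
     (PySem.List.max? ((p :: rest).map Prod.fst) (fun x => x)).getD 0,
     (PySem.List.max? ((p :: rest).map Prod.snd) (fun x => x)).getD 0) =
      pvScanB rest (p.1, p.2, p.1, p.2) := by
  rw [pvScanB_eq]
  simp only [List.map_cons, PySem.List.min?_id_cons, PySem.List.max?_id_cons, Option.getD_some]

theorem pv_fold_eq (l : List (List (Int × Int))) (h : ∀ b ∈ l, b.isEmpty = false)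
    (acc : List (Int × Int × Int × Int)) :
    l.foldl
      (fun out_rects bbox =>
        let start_x := (PySem.List.min? (bbox.map Prod.fst) (fun x => x)).getD 0
        let end_x   := (PySem.List.max? (bbox.map Prod.fst) (fun x => x)).getD 0
        let start_y := (PySem.List.min? (bbox.map Prod.snd) (fun x => x)).getD 0
        let end_y   := (PySem.List.max? (bbox.map Prod.snd) (fun x => x)).getD 0
        out_rects ++ [(start_x, start_y, end_x, end_y)]) acc =
    l.foldl
      (fun out_rects bbox =>
        match bbox with
        | [] => out_rects
        | p :: rest => out_rects ++ [pvScanB rest (p.1, p.2, p.1, p.2)]) acc := by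
  induction l generalizing acc with
  | nil => rfl
  | cons bbox t ih =>
      have hne := h bbox (by simp)
      match bbox, hne with
      | p :: rest, _ =>
        simp only [List.foldl_cons]
        rw [pv_per_bbox p rest]
        exact ih (fun b hb => h b (by simp [hb])) _

-- ===== VERDICT (by name: the statement is the Claim_ definition above) =====
theorem formatting_bbox_spec : Claim_equal_formatting_bbox := by
  intro all_bbox _ hpre
  unfold Spec_formatting_bbox formatting_bbox formatting_bbox_alt
  simp only [Pre_formatting_bbox, List.all_eq_true, Bool.not_eq_eq_eq_not, Bool.not_true] at hpre
  exact pv_fold_eq all_bbox hpre []
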